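-- pv_equiv track=rewrite | github.com/jorgenwh/kmer-counting-experimentation | check_counter_correctness.py | create_ref
-- ===== SOURCE A (Python) =====
-- def create_ref(keys, kmers):
--     ref = {}
--     for key in keys:
--         ref[key] = 0
--     for key in kmers:
--         if key in ref:
--             ref[key] += 1
--     return ref
-- ===== SOURCE B (Python) =====
-- def create_ref(keys, kmers):
--     srt = sorted(kmers)
--     n = len(srt)
--
--     def left(x):
--         lo, hi = 0, n
--         while lo < hi:
--             mid = (lo + hi) // 2
--             if srt[mid] < x:
--                 lo = mid + 1
--             else:
--                 hi = mid
--         return lo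
--
--     def right(x):
--         lo, hi = 0, n
--         while lo < hi:
--             mid = (lo + hi) // 2
--             if srt[mid] <= x:
--                 lo = mid + 1
--             else:
--                 hi = mid
--         return lo
--
--     return {key: right(key) - left(key) for key in keys}
-- ===== Notes on version B (the rewrite author's own statement) =====
-- stated objective: alternative
-- what changed: B sorts the kmers once and computes each requested key's count as the difference of two hand-written binary searches (bisect_right - bisect_left) over the sorted array, instead of A's hash-table init-zeros-then-conditionally-increment counting pass.
import Mathlib
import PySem

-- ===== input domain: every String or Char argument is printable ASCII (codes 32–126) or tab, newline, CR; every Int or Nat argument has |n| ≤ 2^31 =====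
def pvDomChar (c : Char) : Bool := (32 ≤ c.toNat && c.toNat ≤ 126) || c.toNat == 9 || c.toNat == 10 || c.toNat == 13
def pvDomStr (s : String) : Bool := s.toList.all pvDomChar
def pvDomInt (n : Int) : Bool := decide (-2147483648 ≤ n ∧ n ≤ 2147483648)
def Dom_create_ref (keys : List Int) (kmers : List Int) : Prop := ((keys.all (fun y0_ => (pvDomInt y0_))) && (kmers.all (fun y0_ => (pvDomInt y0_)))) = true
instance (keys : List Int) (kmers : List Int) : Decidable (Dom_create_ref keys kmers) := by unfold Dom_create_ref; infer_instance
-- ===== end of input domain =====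

-- B sorts the kmers once and computes each requested key's count as the difference of two
-- hand-written binary searches (bisect_right - bisect_left) over the sorted list, instead of
-- A's hash-table init-zeros-then-conditionally-increment counting pass; same return value.

-- ===== PORT A =====
def create_ref (keys : List Int) (kmers : List Int) : List (Int × Int) :=
  let ref : PySem.Dict Int Int := keys.foldl (fun d key => d.insert key 0) PySem.Dict.empty
  let ref := kmers.foldl (fun d key => if d.contains key then d.modify key 0 (· + 1) else d) ref
  ref.items

-- ===== PORT B =====
-- Source B's inner 'left' while-loop (bisect_left); srt[mid] is in range whenever lo < hi ≤ len srt,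
-- so the total getD access is exact there.
def bsLeft (srt : List Int) (x : Int) (lo hi : Nat) : Nat :=
  if lo < hi then
    let mid := (lo + hi) / 2
    if srt.getD mid 0 < x then bsLeft srt x (mid + 1) hi else bsLeft srt x lo mid
  else lo
termination_by hi - lo
decreasing_by all_goals omega

-- Source B's inner 'right' while-loop (bisect_right)
def bsRight (srt : List Int) (x : Int) (lo hi : Nat) : Nat :=
  if lo < hi then
    let mid := (lo + hi) / 2
    if srt.getD mid 0 ≤ x then bsRight srt x (mid + 1) hi else bsRight srt x lo mid
  else lo
termination_by hi - lo
decreasing_by all_goals omega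

def create_ref_alt (keys : List Int) (kmers : List Int) : List (Int × Int) :=
  let srt := PySem.List.sorted kmers (fun x => x) false
  let n := srt.length
  (keys.foldl
    (fun d key => d.insert key ((bsRight srt key 0 n : Int) - (bsLeft srt key 0 n : Int)))
    PySem.Dict.empty).items

-- ===== PRECONDITION & SPEC =====
def Spec_create_ref (keys : List Int) (kmers : List Int) (out : List (Int × Int)) : Prop := out = create_ref_alt keys kmers
instance (keys : List Int) (kmers : List Int) (out : List (Int × Int)) : Decidable (Spec_create_ref keys kmers out) := by unfold Spec_create_ref; infer_instance

-- ===== CLAIM (what is proved, stated in full; the proofs are below) =====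
def Claim_equal_create_ref : Prop := ∀ (keys : List Int) (kmers : List Int), Dom_create_ref keys kmers → Spec_create_ref keys kmers (create_ref keys kmers)

-- ===== LEMMAS AND PROOFS =====

-- A's second loop does not change the key list of the dict.
theorem condLoop_keys (l : List Int) (d : PySem.Dict Int Int) :
    (l.foldl (fun d key => if d.contains key then d.modify key 0 (· + 1) else d) d).keys = d.keys := by
  induction l generalizing d with
  | nil => rfl
  | cons x l ih =>
    simp only [List.foldl_cons]
    by_cases h : d.contains x
    · simp only [h, if_true, ih]
      simp [PySem.Dict.keys_insert_of_contains, PySem.Dict.keys_modify, h]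
    · simp [h, ih]

-- Value invariant of A's second loop: each present key gains the count of its occurrences.
theorem condLoop_getD (l : List Int) (d : PySem.Dict Int Int) (k : Int) :
    (l.foldl (fun d key => if d.contains key then d.modify key 0 (· + 1) else d) d).getD k 0
      = d.getD k 0 + (if d.contains k then (l.count k : Int) else 0) := by
  induction l generalizing d with
  | nil => simp
  | cons x l ih =>
    simp only [List.foldl_cons]
    by_cases hx : d.contains x
    · simp only [hx, if_true]
      rw [ih, PySem.Dict.getD_modify, PySem.Dict.contains_modify]
      by_cases hk : k = x
      · subst hk
        simp only [if_true, hx, List.count_cons_self, beq_self_eq_true, Bool.true_or]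
        push_cast
        ring
      · simp [hk, Ne.symm hk]
    · simp only [hx, Bool.false_eq_true, if_false]
      rw [ih]
      by_cases hk : d.contains k
      · have hne : ¬ (x = k) := fun h => hx (h ▸ hk)
        simp [hk, hne]
      · simp [hk]

-- A's first loop: every requested key is initialised to 0.
theorem initLoop_getD (l : List Int) (d : PySem.Dict Int Int) (k : Int) :
    (l.foldl (fun d key => d.insert key 0) d).getD k 0
      = if k ∈ l then 0 else d.getD k 0 := by
  induction l generalizing d with
  | nil => simp
  | cons x l ih =>
    simp only [List.foldl_cons, ih]
    by_cases hk : k ∈ l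
    · simp [hk]
    · by_cases hx : k = x
      · subst hx; simp [hk]
      · simp [hk, hx, PySem.Dict.getD_insert]

-- B's projection loop: each requested key holds the value g computes for it.
theorem projLoop_getD (l : List Int) (d : PySem.Dict Int Int) (g : Int → Int) (k : Int) :
    (l.foldl (fun d key => d.insert key (g key)) d).getD k 0
      = if k ∈ l then g k else d.getD k 0 := by
  induction l generalizing d with
  | nil => simp
  | cons x l ih =>
    simp only [List.foldl_cons, ih]
    by_cases hk : k ∈ l
    · simp [hk]
    · by_cases hx : k = x
      · subst hx; simp [hk]
      · simp [hk, hx, PySem.Dict.getD_insert]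

-- A list split at a boundary r (everything before r satisfies p, nothing from r on does)
-- has exactly r elements satisfying p.
theorem countP_eq_boundary (s : List Int) (p : Int → Bool) (r : Nat)
    (hr : r ≤ s.length)
    (hlo : ∀ i, i < r → p (s.getD i 0))
    (hhi : ∀ i, r ≤ i → i < s.length → ¬ p (s.getD i 0)) :
    s.countP p = r := by
  induction s generalizing r with
  | nil => simp only [List.countP_nil, List.length_nil] at *; omega
  | cons a t ih =>
    cases r with
    | zero =>
      simp only [List.countP_eq_zero]
      intro y hy
      obtain ⟨i, hi, rfl⟩ := List.mem_iff_getElem.mp hy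
      have := hhi i (Nat.zero_le _) hi
      simpa [List.getD_eq_getElem?_getD, List.getElem?_eq_getElem hi] using this
    | succ r =>
      have ha : p a := by simpa using hlo 0 (Nat.succ_pos _)
      have : t.countP p = r := by
        refine ih r (by simpa using hr) (fun i hi => ?_) (fun i h1 h2 => ?_)
        · simpa using hlo (i + 1) (by omega)
        · simpa using hhi (i + 1) (by omega) (by simpa using Nat.succ_lt_succ h2)
      simp [ha, this]

-- countP (≤ x) splits into countP (< x) plus the number of exact hits.
theorem countP_le_split (s : List Int) (x : Int) :
    s.countP (fun y => decide (y ≤ x))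
      = s.countP (fun y => decide (y < x)) + s.count x := by
  induction s with
  | nil => simp
  | cons a t ih =>
    by_cases h : a = x
    · subst h; simp [ih]; omega
    · rcases lt_or_gt_of_ne h with hlt | hgt
      · simp [ih, h, le_of_lt hlt, hlt]; omega
      · simp [ih, h, not_le_of_gt hgt, not_lt_of_gt hgt]
-- (abbreviation for the sorted list B searches)
def srtOf (kmers : List Int) : List Int := PySem.List.sorted kmers (fun x => x) false

theorem srtOf_mono (kmers : List Int) {i j : Nat} (hij : i ≤ j) (hj : j < (srtOf kmers).length) :
    (srtOf kmers).getD i 0 ≤ (srtOf kmers).getD j 0 := by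
  have hi : i < (srtOf kmers).length := lt_of_le_of_lt hij hj
  rw [List.getD_eq_getElem?_getD, List.getD_eq_getElem?_getD,
      List.getElem?_eq_getElem hi, List.getElem?_eq_getElem hj]
  exact PySem.List.sorted_id_getElem_mono kmers hij hj

-- bsLeft, run with a valid bracketing invariant, lands on the boundary of (< x).
theorem bsLeft_spec (kmers : List Int) (x : Int) : ∀ (lo hi : Nat),
    lo ≤ hi → hi ≤ (srtOf kmers).length →
    (∀ i, i < lo → (srtOf kmers).getD i 0 < x) →
    (∀ i, hi ≤ i → i < (srtOf kmers).length → ¬ (srtOf kmers).getD i 0 < x) →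
    bsLeft (srtOf kmers) x lo hi = (srtOf kmers).countP (fun y => decide (y < x)) := by
  intro lo hi
  induction hn : hi - lo using Nat.strong_induction_on generalizing lo hi with
  | _ n ih =>
  intro hle hlen hlo hhi
  rw [bsLeft]
  by_cases h : lo < hi
  · simp only [h, if_true]
    set mid := (lo + hi) / 2 with hmid
    have hmlt : mid < hi := by omega
    have hmge : lo ≤ mid := by omega
    by_cases hc : (srtOf kmers).getD mid 0 < x
    · simp only [hc, if_true]
      refine ih (hi - (mid + 1)) (by omega) (mid + 1) hi rfl (by omega) hlen ?_ hhi
      intro i hi'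
      exact lt_of_le_of_lt (srtOf_mono kmers (by omega) (by omega)) hc
    · simp only [hc, if_false]
      refine ih (mid - lo) (by omega) lo mid rfl (by omega) (by omega) hlo ?_
      intro i h1 h2 hcon
      exact hc (lt_of_le_of_lt (srtOf_mono kmers h1 (by omega)) hcon)
  · simp only [h, if_false]
    have : lo = hi := by omega
    subst this
    exact (countP_eq_boundary _ _ lo (by omega) (fun i h1 => by simpa using hlo i h1) (fun i h1 h2 => by simpa using hhi i h1 h2)).symm

-- bsRight likewise lands on the boundary of (≤ x).
theorem bsRight_spec (kmers : List Int) (x : Int) : ∀ (lo hi : Nat),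
    lo ≤ hi → hi ≤ (srtOf kmers).length →
    (∀ i, i < lo → (srtOf kmers).getD i 0 ≤ x) →
    (∀ i, hi ≤ i → i < (srtOf kmers).length → ¬ (srtOf kmers).getD i 0 ≤ x) →
    bsRight (srtOf kmers) x lo hi = (srtOf kmers).countP (fun y => decide (y ≤ x)) := by
  intro lo hi
  induction hn : hi - lo using Nat.strong_induction_on generalizing lo hi with
  | _ n ih =>
  intro hle hlen hlo hhi
  rw [bsRight]
  by_cases h : lo < hi
  · simp only [h, if_true]
    set mid := (lo + hi) / 2 with hmid
    by_cases hc : (srtOf kmers).getD mid 0 ≤ x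
    · simp only [hc, if_true]
      refine ih (hi - (mid + 1)) (by omega) (mid + 1) hi rfl (by omega) hlen ?_ hhi
      intro i hi'
      exact le_trans (srtOf_mono kmers (by omega) (by omega)) hc
    · simp only [hc, if_false]
      refine ih ((lo + hi) / 2 - lo) (by omega) lo mid rfl (by omega) (by omega) hlo ?_
      intro i h1 h2 hcon
      exact hc (le_trans (srtOf_mono kmers h1 (by omega)) hcon)
  · simp only [h, if_false]
    have : lo = hi := by omega
    subst this
    exact (countP_eq_boundary _ _ lo (by omega) (fun i h1 => by simpa using hlo i h1) (fun i h1 h2 => by simpa using hhi i h1 h2)).symm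

-- B's per-key value is the occurrence count of that key among the kmers.
theorem bs_diff_eq_count (kmers : List Int) (x : Int) :
    (bsRight (srtOf kmers) x 0 (srtOf kmers).length : Int)
      - (bsLeft (srtOf kmers) x 0 (srtOf kmers).length : Int) = (kmers.count x : Int) := by
  have hL := bsLeft_spec kmers x 0 (srtOf kmers).length (Nat.zero_le _) le_rfl
    (by omega) (by intro i h1 h2; omega)
  have hR := bsRight_spec kmers x 0 (srtOf kmers).length (Nat.zero_le _) le_rfl
    (by omega) (by intro i h1 h2; omega)
  rw [hL, hR, countP_le_split]
  have hperm : (srtOf kmers).Perm kmers := PySem.List.sorted_perm kmers (fun x => x) false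
  rw [hperm.count_eq]
  push_cast
  ring

-- ===== VERDICT (by name: the statement is the Claim_ definition above) =====
theorem create_ref_spec : Claim_equal_create_ref := by
  intro keys kmers _
  unfold Spec_create_ref create_ref create_ref_alt
  simp only []
  set ref0 : PySem.Dict Int Int := keys.foldl (fun d key => d.insert key 0) PySem.Dict.empty with href0
  set refA : PySem.Dict Int Int :=
    kmers.foldl (fun d key => if d.contains key then d.modify key 0 (· + 1) else d) ref0 with hrefA
  set srt : List Int := PySem.List.sorted kmers (fun x => x) false with hsrt
  set refB : PySem.Dict Int Int :=
    keys.foldl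
      (fun d key => d.insert key ((bsRight srt key 0 srt.length : Int) - (bsLeft srt key 0 srt.length : Int)))
      PySem.Dict.empty with hrefB
  have hk0 : ref0.keys = PySem.Set.update [] keys := by
    rw [href0, PySem.Dict.keys_foldl_insert]; rfl
  have hkA : refA.keys = PySem.Set.update [] keys := by
    rw [hrefA, condLoop_keys, hk0]
  have hkB : refB.keys = PySem.Set.update [] keys := by
    rw [hrefB, PySem.Dict.keys_foldl_insert]; rfl
  have hndA : refA.keys.Nodup := by
    rw [hrefA, condLoop_keys, href0]
    exact PySem.Dict.nodup_keys_foldl_insert _ _ _ PySem.Dict.nodup_keys_empty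
  have hndB : refB.keys.Nodup := by
    rw [hrefB]
    exact PySem.Dict.nodup_keys_foldl_insert _ _ _ PySem.Dict.nodup_keys_empty
  rw [PySem.Dict.items_eq_map_keys refA hndA 0, PySem.Dict.items_eq_map_keys refB hndB 0,
      hkA, hkB]
  apply List.map_congr_left
  intro k hkmem
  have hkKeys : k ∈ keys := by
    have := (PySem.Set.mem_update (s := []) (xs := keys) (y := k)).mp hkmem
    simpa using this
  have hcontains : ref0.contains k := by
    rw [PySem.Dict.contains_iff_mem_keys, hk0]; exact hkmem
  have hA : refA.getD k 0 = (kmers.count k : Int) := by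
    rw [hrefA, condLoop_getD, href0, initLoop_getD]
    simp [hkKeys, href0 ▸ hcontains]
  have hB : refB.getD k 0 = (kmers.count k : Int) := by
    rw [hrefB, projLoop_getD]
    simp only [hkKeys, if_true]
    exact bs_diff_eq_count kmers k
  rw [hA, hB]
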